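-- pv_equiv track=rewrite | github.com/AnandakrishnanV/Solving-Puzzles-with-Z3 | TwentyFourSeven.py | is_fully_connected
-- ===== SOURCE A (Python) =====
-- from collections import deque
--
-- def is_fully_connected(matrix):
--     rows, cols = len(matrix), len(matrix[0])
--     visited = [[False] * cols for _ in range(rows)]
--     q = deque()
--     connected_components = 0
--
--     for i in range(rows):
--         for j in range(cols):
--             if matrix[i][j] >= 1 and not visited[i][j]:
--                 # Start a new connected component
--                 connected_components += 1
--                 q.append((i, j))
--                 visited[i][j] = True
--                 while q:
--                     x, y = q.popleft()
--                     # Visit all the neighbors of the current cell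
--                     for dx, dy in [(0, 1), (0, -1), (1, 0), (-1, 0)]:
--                         nx, ny = x + dx, y + dy
--                         if (
--                             0 <= nx < rows
--                             and 0 <= ny < cols
--                             and matrix[nx][ny] >= 1
--                             and not visited[nx][ny]
--                         ):
--                             q.append((nx, ny))
--                             visited[nx][ny] = True
--
--     # Check if there is only one connected component
--     return connected_components == 1
-- ===== SOURCE B (Python) =====
-- def is_fully_connected(matrix):
--     rows, cols = len(matrix), len(matrix[0])
--     cells = [(i, j) for i in range(rows) for j in range(cols) if matrix[i][j] >= 1]
--     if not cells:
--         return False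
--     reached = {cells[0]}
--     while True:
--         grown = set(reached)
--         for (x, y) in cells:
--             if (x, y) not in grown:
--                 if (x + 1, y) in reached or (x - 1, y) in reached \
--                         or (x, y + 1) in reached or (x, y - 1) in reached:
--                     grown.add((x, y))
--         if len(grown) == len(reached):
--             break
--         reached = grown
--     return len(reached) == len(cells)
-- ===== Notes on version B (the rewrite author's own statement) =====
-- stated objective: alternative
-- what changed: A counts components by flood-filling with a queue and a visited grid from every unvisited cell; B instead builds the list of >=1 cells once, then grows a single reachable set from the first such cell by iterating a global neighborhood-expansion step to a fixpoint, and compares its size with the number of >=1 cells (no queue, no visited grid, no component counter).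
import Mathlib
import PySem

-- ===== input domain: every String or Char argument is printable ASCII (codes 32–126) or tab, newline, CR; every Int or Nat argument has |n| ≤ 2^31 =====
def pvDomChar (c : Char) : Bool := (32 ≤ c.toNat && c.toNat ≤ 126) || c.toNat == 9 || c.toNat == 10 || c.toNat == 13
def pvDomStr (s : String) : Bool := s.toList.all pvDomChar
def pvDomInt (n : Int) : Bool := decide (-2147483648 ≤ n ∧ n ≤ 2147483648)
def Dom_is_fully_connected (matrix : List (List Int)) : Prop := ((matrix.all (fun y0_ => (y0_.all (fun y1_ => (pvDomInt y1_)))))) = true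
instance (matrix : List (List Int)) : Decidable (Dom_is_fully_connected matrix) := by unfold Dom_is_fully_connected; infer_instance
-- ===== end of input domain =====

-- B replaces A's per-cell queue flood fill with a single global fixpoint iteration over the set
-- of >=1 cells (alternative algorithm, same observable return value on all non-raising inputs).

-- ===== PORT A =====
-- matrix[x][y] (read only at guarded in-range non-negative indices inside Pre_)
def pvVal (matrix : List (List Int)) (x y : Int) : Int :=
  PySem.List.pyGetD (PySem.List.pyGetD matrix x []) y 0

-- visited[x][y]
def pvVisAt (v : List (List Bool)) (x y : Int) : Bool :=
  PySem.List.pyGetD (PySem.List.pyGetD v x []) y false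

-- visited[x][y] = True
def pvMark (v : List (List Bool)) (x y : Int) : List (List Bool) :=
  PySem.List.pySetD v x (PySem.List.pySetD (PySem.List.pyGetD v x []) y true)

def pvDirs : List (Int × Int) := [(0,1),(0,-1),(1,0),(-1,0)]

-- A's inner "for dx, dy in [...]" over the popped cell (x, y)
def pvScan (matrix : List (List Int)) (rows cols : Int) (x y : Int)
    (st : List (List Bool) × List (Int × Int)) (ds : List (Int × Int)) :
    List (List Bool) × List (Int × Int) :=
  ds.foldl (fun st d =>
    let nx := x + d.1
    let ny := y + d.2
    if 0 ≤ nx ∧ nx < rows ∧ 0 ≤ ny ∧ ny < cols ∧ 1 ≤ pvVal matrix nx ny ∧ pvVisAt st.1 nx ny = false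
    then (pvMark st.1 nx ny, st.2 ++ [(nx, ny)])
    else st) st

-- A's "while q:" loop (fuel only makes the recursion total; one unit per popleft)
def pvBfs (matrix : List (List Int)) (rows cols : Int) :
    Nat → List (Int × Int) → List (List Bool) → List (List Bool)
  | 0, _, v => v
  | _ + 1, [], v => v
  | fuel + 1, p :: rest, v =>
      let r := pvScan matrix rows cols p.1 p.2 (v, []) pvDirs
      pvBfs matrix rows cols fuel (rest ++ r.2) r.1

def is_fully_connected (matrix : List (List Int)) : Bool :=
  let rows : Int := matrix.length
  let cols : Int := (PySem.List.pyGetD matrix 0 ([] : List Int)).length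
  let visited : List (List Bool) :=
    (PySem.List.pyRange 0 rows 1).map (fun _ => List.replicate cols.toNat false)
  let final :=
    (PySem.List.pyRange 0 rows 1).foldl (fun st i =>
      (PySem.List.pyRange 0 cols 1).foldl (fun st j =>
        if 1 ≤ pvVal matrix i j ∧ pvVisAt st.1 i j = false then
          (pvBfs matrix rows cols (rows.toNat * cols.toNat + 1) [(i, j)] (pvMark st.1 i j),
           st.2 + 1)
        else st) st) (visited, (0 : Int))
  final.2 == 1

-- ===== PORT B =====
-- cells = [(i, j) for i in range(rows) for j in range(cols) if matrix[i][j] >= 1]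
def pvCells (matrix : List (List Int)) (rows cols : Int) : List (Int × Int) :=
  (PySem.List.pyRange 0 rows 1).foldl (fun acc i =>
    (PySem.List.pyRange 0 cols 1).foldl (fun acc j =>
      if 1 ≤ pvVal matrix i j then acc ++ [(i, j)] else acc) acc) []

-- one expansion pass: grown = set(reached); add every listed cell with a neighbour in reached
def pvGrow (cells : List (Int × Int)) (reached : PySem.Set (Int × Int)) : PySem.Set (Int × Int) :=
  cells.foldl (fun grown c =>
    if PySem.Set.contains grown c then grown
    else if PySem.Set.contains reached (c.1 + 1, c.2) || PySem.Set.contains reached (c.1 - 1, c.2)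
        || PySem.Set.contains reached (c.1, c.2 + 1) || PySem.Set.contains reached (c.1, c.2 - 1)
    then PySem.Set.add grown c
    else grown) (PySem.Set.ofList reached)

-- B's "while True:" loop (fuel only makes the recursion total; the set strictly grows each round)
def pvExpand (cells : List (Int × Int)) : Nat → PySem.Set (Int × Int) → PySem.Set (Int × Int)
  | 0, reached => reached
  | fuel + 1, reached =>
      let grown := pvGrow cells reached
      if PySem.Set.len grown == PySem.Set.len reached then reached
      else pvExpand cells fuel grown

def is_fully_connected_alt (matrix : List (List Int)) : Bool :=
  let rows : Int := matrix.length
  let cols : Int := (PySem.List.pyGetD matrix 0 ([] : List Int)).length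
  let cells := pvCells matrix rows cols
  if cells.isEmpty then false
  else
    let reached := pvExpand cells (cells.length + 1)
      (PySem.Set.add PySem.Set.empty (PySem.List.pyGetD cells 0 ((0 : Int), (0 : Int))))
    PySem.Set.len reached == (cells.length : Int)

-- ===== PRECONDITION & SPEC =====
-- Pre_ excludes exactly the inputs where the Python A raises (IndexError): the empty matrix
-- (len(matrix[0])) and matrices with a row shorter than the first row (both loops index every
-- column j < len(matrix[0]) of every row). B raises on exactly the same inputs.
def Pre_is_fully_connected (matrix : List (List Int)) : Prop :=
  matrix ≠ [] ∧ ∀ row ∈ matrix, (matrix.headD []).length ≤ row.length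
instance (matrix : List (List Int)) : Decidable (Pre_is_fully_connected matrix) := by
  unfold Pre_is_fully_connected; infer_instance

def pvWitness_is_fully_connected : List (List Int) := [[1, 1], [0, 1]]

def Spec_is_fully_connected (matrix : List (List Int)) (out : Bool) : Prop := out = is_fully_connected_alt matrix
instance (matrix : List (List Int)) (out : Bool) : Decidable (Spec_is_fully_connected matrix out) := by unfold Spec_is_fully_connected; infer_instance

-- ===== CLAIM (what is proved, stated in full; the proofs are below) =====
def Claim_equal_is_fully_connected : Prop := ∀ (matrix : List (List Int)), Dom_is_fully_connected matrix → Pre_is_fully_connected matrix → Spec_is_fully_connected matrix (is_fully_connected matrix)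

-- ===== LEMMAS AND PROOFS =====

-- the reference notions: in-range cells, qualifying cells, 4-adjacency, closed sets, and the
-- least adjacency-closed set of qualifying cells containing a seed (its connected component)
def pvInR (rows cols : Int) (p : Int × Int) : Prop :=
  0 ≤ p.1 ∧ p.1 < rows ∧ 0 ≤ p.2 ∧ p.2 < cols

def pvQ (m : List (List Int)) (rows cols : Int) (p : Int × Int) : Prop :=
  pvInR rows cols p ∧ 1 ≤ pvVal m p.1 p.2

def pvAdjD (ds : List (Int × Int)) (p q : Int × Int) : Prop :=
  ∃ d ∈ ds, q = (p.1 + d.1, p.2 + d.2)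

def pvAdj (p q : Int × Int) : Prop := pvAdjD pvDirs p q

def pvClosed (m : List (List Int)) (rows cols : Int) (T : Int × Int → Prop) : Prop :=
  ∀ p q, T p → pvQ m rows cols q → pvAdj p q → T q

def pvComp (m : List (List Int)) (rows cols : Int) (s q : Int × Int) : Prop :=
  ∀ T, pvClosed m rows cols T → T s → T q

-- grid abstraction for A's visited matrix
def pvWF (rows cols : Int) (v : List (List Bool)) : Prop :=
  v.length = rows.toNat ∧ ∀ r ∈ v, r.length = cols.toNat

def pvVS (rows cols : Int) (v : List (List Bool)) (p : Int × Int) : Prop :=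
  pvInR rows cols p ∧ pvVisAt v p.1 p.2 = true

noncomputable def pvVfin (rows cols : Int) (v : List (List Bool)) : Finset (Int × Int) :=
  (Finset.Ico (0 : Int) rows ×ˢ Finset.Ico (0 : Int) cols).filter
    (fun p => pvVisAt v p.1 p.2 = true)

theorem pvAdj_symm (p q : Int × Int) (h : pvAdj p q) : pvAdj q p := by
  obtain ⟨a, b⟩ := p
  obtain ⟨d, hd, rfl⟩ := h
  simp only [pvDirs, List.mem_cons, List.not_mem_nil, or_false] at hd
  rcases hd with rfl | rfl | rfl | rfl
  · exact ⟨(0, -1), by simp [pvDirs], by simp⟩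
  · exact ⟨(0, 1), by simp [pvDirs], by simp⟩
  · exact ⟨(-1, 0), by simp [pvDirs], by simp⟩
  · exact ⟨(1, 0), by simp [pvDirs], by simp⟩

theorem pvComp_self (m : List (List Int)) (rows cols : Int) (s : Int × Int) :
    pvComp m rows cols s s := fun _ _ hs => hs

theorem pvComp_closed (m : List (List Int)) (rows cols : Int) (s : Int × Int) :
    pvClosed m rows cols (pvComp m rows cols s) := by
  intro p q hp hq hadj T hT hs
  exact hT p q (hp T hT hs) hq hadj

theorem pvComp_sub_Q (m : List (List Int)) (rows cols : Int) (s p : Int × Int)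
    (hs : pvQ m rows cols s) (h : pvComp m rows cols s p) : pvQ m rows cols p := by
  exact h (pvQ m rows cols) (fun _ q _ hq _ => hq) hs

theorem pvComp_trans (m : List (List Int)) (rows cols : Int) (a b c : Int × Int)
    (h1 : pvComp m rows cols a b) (h2 : pvComp m rows cols b c) : pvComp m rows cols a c :=
  fun T hT ha => h2 T hT (h1 T hT ha)

theorem pvComp_symm (m : List (List Int)) (rows cols : Int) (s t : Int × Int)
    (hs : pvQ m rows cols s) (h : pvComp m rows cols s t) : pvComp m rows cols t s := by
  have hU : pvClosed m rows cols (fun x => pvQ m rows cols x ∧ pvComp m rows cols x s) := by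
    intro p q hp hq hadj
    refine ⟨hq, fun T' hT' hqT' => ?_⟩
    have hpT' : T' p := hT' q p hqT' hp.1 (pvAdj_symm p q hadj)
    exact hp.2 T' hT' hpT'
  exact (h _ hU ⟨hs, pvComp_self m rows cols s⟩).2

theorem pvClosed_union (m : List (List Int)) (rows cols : Int) (T1 T2 : Int × Int → Prop)
    (h1 : pvClosed m rows cols T1) (h2 : pvClosed m rows cols T2) :
    pvClosed m rows cols (fun p => T1 p ∨ T2 p) := by
  intro p q hp hq hadj
  rcases hp with hp | hp
  · exact Or.inl (h1 p q hp hq hadj)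
  · exact Or.inr (h2 p q hp hq hadj)

-- reading and writing the visited grid through the Python indexing primitives
theorem pvVisAt_eq (v : List (List Bool)) (x y : Int) (hx0 : 0 ≤ x) (hy0 : 0 ≤ y) :
    pvVisAt v x y = ((v[x.toNat]?.getD [])[y.toNat]?.getD false) := by
  simp [pvVisAt, PySem.List.pyGetD, PySem.List.pyGet?_of_nonneg, hx0, hy0]

theorem pvMark_eq (v : List (List Bool)) (x y : Int) (hx0 : 0 ≤ x) (hy0 : 0 ≤ y) :
    pvMark v x y = v.set x.toNat ((v[x.toNat]?.getD []).set y.toNat true) := by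
  simp [pvMark, PySem.List.pyGetD, PySem.List.pyGet?_of_nonneg, hx0, hy0,
    PySem.List.pySetD_of_nonneg _ _ hx0, PySem.List.pySetD_of_nonneg _ _ hy0]

theorem pvVisAt_mark (v : List (List Bool)) (px py qx qy : Int)
    (hpx0 : 0 ≤ px) (hpy0 : 0 ≤ py) (hqx0 : 0 ≤ qx) (hqy0 : 0 ≤ qy)
    (hpx : px.toNat < v.length) (hpy : py.toNat < (v[px.toNat]?.getD []).length) :
    pvVisAt (pvMark v px py) qx qy =
      if qx = px ∧ qy = py then true else pvVisAt v qx qy := by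
  have hpy2 : py.toNat < v[px.toNat].length := by
    rw [List.getElem?_eq_getElem hpx] at hpy; simpa using hpy
  rw [pvVisAt_eq _ _ _ hqx0 hqy0, pvVisAt_eq v qx qy hqx0 hqy0,
    pvMark_eq v px py hpx0 hpy0]
  by_cases hx : px.toNat = qx.toNat
  · have hx' : px = qx := by omega
    subst hx'
    by_cases hy : py.toNat = qy.toNat
    · have hy' : py = qy := by omega
      subst hy'
      simp [List.getElem?_set, hpx, hpy, hpy2]
    · have hy' : ¬ (qy = py) := by omega
      simp [List.getElem?_set, hpx, hy, hy']
  · have hx' : ¬ (qx = px) := by omega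
    simp [List.getElem?_set, hx, hx']

theorem pvMark_WF (rows cols : Int) (v : List (List Bool)) (x y : Int)
    (hwf : pvWF rows cols v) (hx0 : 0 ≤ x) (hx : x < rows) (hy0 : 0 ≤ y) :
    pvWF rows cols (pvMark v x y) := by
  obtain ⟨hlen, hrow⟩ := hwf
  rw [pvMark_eq v x y hx0 hy0]
  refine ⟨by simpa using hlen, ?_⟩
  intro r hr
  rcases List.mem_or_eq_of_mem_set hr with hr | rfl
  · exact hrow r hr
  · have hx' : x.toNat < v.length := by omega
    rw [List.getElem?_eq_getElem hx']
    simpa using hrow v[x.toNat] (v.getElem_mem hx')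

theorem pvRow_len (rows cols : Int) (v : List (List Bool)) (x : Int)
    (hwf : pvWF rows cols v) (hx0 : 0 ≤ x) (hx : x < rows) :
    (v[x.toNat]?.getD []).length = cols.toNat := by
  obtain ⟨hlen, hrow⟩ := hwf
  have hx' : x.toNat < v.length := by omega
  rw [List.getElem?_eq_getElem hx']
  simpa using hrow v[x.toNat] (v.getElem_mem hx')

theorem pvVS_mark (rows cols : Int) (v : List (List Bool)) (p q : Int × Int)
    (hwf : pvWF rows cols v) (hp : pvInR rows cols p) :
    (pvVS rows cols (pvMark v p.1 p.2) q ↔ pvVS rows cols v q ∨ q = p) := by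
  obtain ⟨px, py⟩ := p
  obtain ⟨qx, qy⟩ := q
  obtain ⟨hpx0, hpx, hpy0, hpy⟩ := hp
  simp only at hpx0 hpx hpy0 hpy
  have hpx' : px.toNat < v.length := by have := hwf.1; omega
  have hpylen : py.toNat < (v[px.toNat]?.getD []).length := by
    have := pvRow_len rows cols v px hwf hpx0 hpx; omega
  by_cases hq : pvInR rows cols (qx, qy)
  · obtain ⟨hqx0, hqx, hqy0, hqy⟩ := hq
    simp only at hqx0 hqx hqy0 hqy
    have hkey := pvVisAt_mark v px py qx qy hpx0 hpy0 hqx0 hqy0 hpx' hpylen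
    by_cases hqp : qx = px ∧ qy = py
    · have hq' : ((qx, qy) : Int × Int) = (px, py) := by
        simp [Prod.ext_iff, hqp.1, hqp.2]
      simp [pvVS, hkey, if_pos hqp, hq', pvInR, hpx0, hpx, hpy0, hpy, hqx0, hqx, hqy0, hqy]
    · have : ((qx, qy) : Int × Int) ≠ (px, py) := by
        simp only [ne_eq, Prod.mk.injEq]; tauto
      simp only [pvVS, hkey, if_neg hqp]
      simp [this]
  · have h1 : ¬ pvVS rows cols (pvMark v px py) (qx, qy) := fun h => hq h.1
    have h2 : ¬ pvVS rows cols v (qx, qy) := fun h => hq h.1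
    have hqp : ((qx, qy) : Int × Int) ≠ (px, py) := by
      rintro h
      cases h
      exact hq ⟨hpx0, hpx, hpy0, hpy⟩
    simp [h1, h2, hqp]

theorem pvVfin_mem (rows cols : Int) (v : List (List Bool)) (p : Int × Int) :
    p ∈ pvVfin rows cols v ↔ pvVS rows cols v p := by
  obtain ⟨a, b⟩ := p
  simp only [pvVfin, Finset.mem_filter, Finset.mem_product, Finset.mem_Ico, pvVS, pvInR]
  tauto

theorem pvVfin_card_le (rows cols : Int) (v : List (List Bool)) :
    (pvVfin rows cols v).card ≤ rows.toNat * cols.toNat := by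
  calc (pvVfin rows cols v).card
      ≤ ((Finset.Ico (0 : Int) rows) ×ˢ (Finset.Ico (0 : Int) cols)).card :=
        Finset.card_filter_le _ _
    _ = rows.toNat * cols.toNat := by
        rw [Finset.card_product, Int.card_Ico, Int.card_Ico]
        simp

theorem pvVfin_mark (rows cols : Int) (v : List (List Bool)) (p : Int × Int)
    (hwf : pvWF rows cols v) (hp : pvInR rows cols p) (hnp : ¬ pvVS rows cols v p) :
    (pvVfin rows cols (pvMark v p.1 p.2)).card = (pvVfin rows cols v).card + 1 := by
  have hins : pvVfin rows cols (pvMark v p.1 p.2) = insert p (pvVfin rows cols v) := by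
    ext q
    rw [pvVfin_mem, pvVS_mark rows cols v p q hwf hp, Finset.mem_insert, pvVfin_mem]
    tauto
  rw [hins, Finset.card_insert_of_notMem (by rw [pvVfin_mem]; exact hnp)]

-- the neighbour scan of one popped cell
theorem pvScan_cons (m : List (List Int)) (rows cols x y : Int) (v : List (List Bool))
    (app : List (Int × Int)) (d : Int × Int) (ds : List (Int × Int)) :
    pvScan m rows cols x y (v, app) (d :: ds) =
      pvScan m rows cols x y
        (if 0 ≤ x + d.1 ∧ x + d.1 < rows ∧ 0 ≤ y + d.2 ∧ y + d.2 < cols ∧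
            1 ≤ pvVal m (x + d.1) (y + d.2) ∧ pvVisAt v (x + d.1) (y + d.2) = false
         then (pvMark v (x + d.1) (y + d.2), app ++ [(x + d.1, y + d.2)])
         else (v, app)) ds := rfl

theorem pvScan_spec (m : List (List Int)) (rows cols x y : Int) :
    ∀ (ds : List (Int × Int)) (v : List (List Bool)) (app : List (Int × Int)),
    pvWF rows cols v →
    ∃ v' new, pvScan m rows cols x y (v, app) ds = (v', app ++ new) ∧
      pvWF rows cols v' ∧
      (∀ q, pvVS rows cols v' q ↔ (pvVS rows cols v q ∨ q ∈ new)) ∧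
      (∀ q ∈ new, pvQ m rows cols q ∧ ¬ pvVS rows cols v q ∧ pvAdjD ds (x, y) q) ∧
      (pvVfin rows cols v').card = (pvVfin rows cols v).card + new.length ∧
      (∀ q, pvQ m rows cols q → pvAdjD ds (x, y) q → pvVS rows cols v' q) := by
  intro ds
  induction ds with
  | nil =>
      intro v app hwf
      refine ⟨v, [], by simp [pvScan], hwf, by simp, by simp, by simp, ?_⟩
      rintro q _ ⟨d, hd, -⟩
      simp at hd
  | cons d ds ih =>
      intro v app hwf
      rw [pvScan_cons]
      by_cases hg : 0 ≤ x + d.1 ∧ x + d.1 < rows ∧ 0 ≤ y + d.2 ∧ y + d.2 < cols ∧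
          1 ≤ pvVal m (x + d.1) (y + d.2) ∧ pvVisAt v (x + d.1) (y + d.2) = false
      · rw [if_pos hg]
        obtain ⟨hg1, hg2, hg3, hg4, hg5, hg6⟩ := hg
        have hQc : pvQ m rows cols (x + d.1, y + d.2) := ⟨⟨hg1, hg2, hg3, hg4⟩, hg5⟩
        have hnVc : ¬ pvVS rows cols v (x + d.1, y + d.2) := by
          rintro ⟨-, hvis⟩
          rw [hg6] at hvis
          cases hvis
        have hwf1 : pvWF rows cols (pvMark v (x + d.1) (y + d.2)) :=
          pvMark_WF rows cols v _ _ hwf hg1 hg2 hg3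
        have hVS1 : ∀ q, pvVS rows cols (pvMark v (x + d.1) (y + d.2)) q ↔
            pvVS rows cols v q ∨ q = (x + d.1, y + d.2) :=
          fun q => pvVS_mark rows cols v (x + d.1, y + d.2) q hwf hQc.1
        obtain ⟨v', new, heq, hwf', hiff, hnew, hcard, hall⟩ :=
          ih (pvMark v (x + d.1) (y + d.2)) (app ++ [(x + d.1, y + d.2)]) hwf1
        refine ⟨v', (x + d.1, y + d.2) :: new, ?_, hwf', ?_, ?_, ?_, ?_⟩
        · rw [heq]; simp
        · intro q
          rw [hiff q, hVS1 q]
          simp only [List.mem_cons]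
          tauto
        · intro q hq
          rcases List.mem_cons.mp hq with rfl | hq
          · exact ⟨hQc, hnVc, ⟨d, List.mem_cons_self, rfl⟩⟩
          · obtain ⟨h1, h2, h3⟩ := hnew q hq
            refine ⟨h1, ?_, ?_⟩
            · intro hv
              exact h2 ((hVS1 q).mpr (Or.inl hv))
            · obtain ⟨d', hd', rfl⟩ := h3
              exact ⟨d', List.mem_cons_of_mem d hd', rfl⟩
        · rw [hcard, pvVfin_mark rows cols v _ hwf hQc.1 hnVc]
          simp
          omega
        · rintro q hQ ⟨d', hd', rfl⟩
          rcases List.mem_cons.mp hd' with rfl | hd'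
          · exact (hiff _).mpr (Or.inl ((hVS1 _).mpr (Or.inr rfl)))
          · exact hall _ hQ ⟨d', hd', rfl⟩
      · rw [if_neg hg]
        obtain ⟨v', new, heq, hwf', hiff, hnew, hcard, hall⟩ := ih v app hwf
        refine ⟨v', new, heq, hwf', hiff, ?_, hcard, ?_⟩
        · intro q hq
          obtain ⟨h1, h2, h3⟩ := hnew q hq
          obtain ⟨d', hd', rfl⟩ := h3
          exact ⟨h1, h2, ⟨d', List.mem_cons_of_mem d hd', rfl⟩⟩
        · rintro q hQ ⟨d', hd', rfl⟩
          rcases List.mem_cons.mp hd' with he | hd'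
          · subst he
            obtain ⟨⟨h1, h2, h3, h4⟩, h5⟩ := hQ
            simp only at h1 h2 h3 h4 h5
            have hvis : pvVisAt v (x + d'.1) (y + d'.2) = true := by
              by_cases hv : pvVisAt v (x + d'.1) (y + d'.2) = false
              · exact absurd ⟨h1, h2, h3, h4, h5, hv⟩ hg
              · simpa using hv
            exact (hiff _).mpr (Or.inl ⟨⟨h1, h2, h3, h4⟩, hvis⟩)
          · exact hall _ hQ ⟨d', hd', rfl⟩

theorem pvBfs_spec (m : List (List Int)) (rows cols : Int) :
    ∀ (fuel : Nat) (queue : List (Int × Int)) (v : List (List Bool)),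
    pvWF rows cols v →
    (∀ p ∈ queue, pvQ m rows cols p ∧ pvVS rows cols v p) →
    (∀ p, pvVS rows cols v p → pvQ m rows cols p) →
    (∀ p, pvVS rows cols v p →
      p ∈ queue ∨ ∀ q, pvQ m rows cols q → pvAdj p q → pvVS rows cols v q) →
    queue.length + (rows.toNat * cols.toNat - (pvVfin rows cols v).card) < fuel →
    pvWF rows cols (pvBfs m rows cols fuel queue v) ∧
    (∀ p, pvVS rows cols v p → pvVS rows cols (pvBfs m rows cols fuel queue v) p) ∧
    (∀ p, pvVS rows cols (pvBfs m rows cols fuel queue v) p → pvQ m rows cols p) ∧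
    pvClosed m rows cols (pvVS rows cols (pvBfs m rows cols fuel queue v)) ∧
    (∀ T, pvClosed m rows cols T → (∀ p, pvVS rows cols v p → T p) →
      ∀ p, pvVS rows cols (pvBfs m rows cols fuel queue v) p → T p) := by
  intro fuel
  induction fuel with
  | zero =>
      intro queue v _ _ _ _ hfuel
      exact absurd hfuel (by omega)
  | succ fuel ih =>
      rintro (_ | ⟨p, rest⟩) v hwf hqueue hsub hfront hfuel
      · simp only [pvBfs]
        refine ⟨hwf, fun p h => h, hsub, ?_, fun T _ hT p hp => hT p hp⟩
        intro p q hp hq hadj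
        rcases hfront p hp with h | h
        · simp at h
        · exact h q hq hadj
      · obtain ⟨hpQ, hpV⟩ := hqueue p List.mem_cons_self
        obtain ⟨v', new, heq, hwf', hiff, hnew, hcard, hall⟩ :=
          pvScan_spec m rows cols p.1 p.2 pvDirs v [] hwf
        have hstep : pvBfs m rows cols (fuel + 1) (p :: rest) v =
            pvBfs m rows cols fuel (rest ++ new) v' := by
          simp only [pvBfs, heq, List.nil_append]
        rw [hstep]
        have hmono : ∀ q, pvVS rows cols v q → pvVS rows cols v' q :=
          fun q h => (hiff q).mpr (Or.inl h)
        have hqueue' : ∀ a ∈ rest ++ new, pvQ m rows cols a ∧ pvVS rows cols v' a := by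
          intro a ha
          rcases List.mem_append.mp ha with ha | ha
          · obtain ⟨h1, h2⟩ := hqueue a (List.mem_cons_of_mem p ha)
            exact ⟨h1, hmono a h2⟩
          · obtain ⟨h1, -, -⟩ := hnew a ha
            exact ⟨h1, (hiff a).mpr (Or.inr ha)⟩
        have hsub' : ∀ q, pvVS rows cols v' q → pvQ m rows cols q := by
          intro q hq
          rcases (hiff q).mp hq with h | h
          · exact hsub q h
          · exact (hnew q h).1
        have hfront' : ∀ a, pvVS rows cols v' a →
            a ∈ rest ++ new ∨ ∀ q, pvQ m rows cols q → pvAdj a q → pvVS rows cols v' q := by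
          intro a ha
          rcases (hiff a).mp ha with h | h
          · rcases hfront a h with h' | h'
            · rcases List.mem_cons.mp h' with rfl | h'
              · exact Or.inr (fun q hq hadj => hall q hq hadj)
              · exact Or.inl (List.mem_append.mpr (Or.inl h'))
            · exact Or.inr (fun q hq hadj => hmono q (h' q hq hadj))
          · exact Or.inl (List.mem_append.mpr (Or.inr h))
        have hfuel' : (rest ++ new).length +
            (rows.toNat * cols.toNat - (pvVfin rows cols v').card) < fuel := by
          have h1 := pvVfin_card_le rows cols v'
          simp only [List.length_append, List.length_cons] at hfuel ⊢
          omega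
        obtain ⟨c1, c2, c3, c4, c5⟩ := ih (rest ++ new) v' hwf' hqueue' hsub' hfront' hfuel'
        refine ⟨c1, fun q h => c2 q (hmono q h), c3, c4, ?_⟩
        intro T hT hTv q hq
        refine c5 T hT ?_ q hq
        intro a ha
        rcases (hiff a).mp ha with h | h
        · exact hTv a h
        · obtain ⟨h1, -, h3⟩ := hnew a h
          exact hT p a (hTv p hpV) h1 h3

-- starting a fresh flood fill at an unvisited qualifying cell s adds exactly the component of s
theorem pvBfs_start (m : List (List Int)) (rows cols : Int) (v : List (List Bool)) (s : Int × Int)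
    (hwf : pvWF rows cols v)
    (hsub : ∀ p, pvVS rows cols v p → pvQ m rows cols p)
    (hcl : pvClosed m rows cols (pvVS rows cols v))
    (hQs : pvQ m rows cols s) (hns : ¬ pvVS rows cols v s) :
    pvWF rows cols (pvBfs m rows cols (rows.toNat * cols.toNat + 1) [s] (pvMark v s.1 s.2)) ∧
    (∀ p, pvVS rows cols (pvBfs m rows cols (rows.toNat * cols.toNat + 1) [s] (pvMark v s.1 s.2)) p ↔
      (pvVS rows cols v p ∨ pvComp m rows cols s p)) := by
  have hInRs : pvInR rows cols s := hQs.1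
  have hwf1 : pvWF rows cols (pvMark v s.1 s.2) :=
    pvMark_WF rows cols v s.1 s.2 hwf hInRs.1 hInRs.2.1 hInRs.2.2.1
  have hVS1 : ∀ q, pvVS rows cols (pvMark v s.1 s.2) q ↔ pvVS rows cols v q ∨ q = s :=
    fun q => pvVS_mark rows cols v s q hwf hInRs
  have hcard1 : (pvVfin rows cols (pvMark v s.1 s.2)).card = (pvVfin rows cols v).card + 1 :=
    pvVfin_mark rows cols v s hwf hInRs hns
  have hcardle := pvVfin_card_le rows cols (pvMark v s.1 s.2)
  have hfuel : ([s] : List (Int × Int)).length +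
      (rows.toNat * cols.toNat - (pvVfin rows cols (pvMark v s.1 s.2)).card) <
      rows.toNat * cols.toNat + 1 := by
    simp only [List.length_cons, List.length_nil]
    omega
  obtain ⟨c1, c2, c3, c4, c5⟩ := pvBfs_spec m rows cols (rows.toNat * cols.toNat + 1)
    [s] (pvMark v s.1 s.2) hwf1
    (by
      intro p hp
      rcases List.mem_cons.mp hp with rfl | hp
      · exact ⟨hQs, (hVS1 p).mpr (Or.inr rfl)⟩
      · simp at hp)
    (by
      intro p hp
      rcases (hVS1 p).mp hp with h | rfl
      · exact hsub p h
      · exact hQs)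
    (by
      intro p hp
      rcases (hVS1 p).mp hp with h | rfl
      · refine Or.inr (fun q hq hadj => (hVS1 q).mpr (Or.inl (hcl p q h hq hadj)))
      · exact Or.inl List.mem_cons_self)
    hfuel
  refine ⟨c1, ?_⟩
  intro p
  constructor
  · intro hp
    refine c5 (fun q => pvVS rows cols v q ∨ pvComp m rows cols s q) ?_ ?_ p hp
    · exact pvClosed_union m rows cols _ _ hcl (pvComp_closed m rows cols s)
    · intro a ha
      rcases (hVS1 a).mp ha with h | rfl
      · exact Or.inl h
      · exact Or.inr (pvComp_self m rows cols a)
  · intro hp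
    rcases hp with h | h
    · exact c2 p ((hVS1 p).mpr (Or.inl h))
    · exact h _ c4 (c2 s ((hVS1 s).mpr (Or.inr rfl)))

-- A's outer double loop, flattened over the row-major cell list
def pvAll (rows cols : Int) : List (Int × Int) :=
  (PySem.List.pyRange 0 rows 1) ×ˢ (PySem.List.pyRange 0 cols 1)

theorem pvAll_flat (rows cols : Int) :
    pvAll rows cols =
      (PySem.List.pyRange 0 rows 1).flatMap
        (fun i => (PySem.List.pyRange 0 cols 1).map (fun j => (i, j))) := rfl

theorem pvAll_mem (rows cols : Int) (p : Int × Int) :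
    p ∈ pvAll rows cols ↔ pvInR rows cols p := by
  obtain ⟨a, b⟩ := p
  simp [pvAll, List.mem_product, PySem.List.mem_pyRange_one, pvInR]
  tauto

theorem pvAll_nodup (rows cols : Int) : (pvAll rows cols).Nodup :=
  List.Nodup.product (PySem.List.nodup_pyRange_one 0 rows) (PySem.List.nodup_pyRange_one 0 cols)

def pvStep (m : List (List Int)) (rows cols : Int) (st : List (List Bool) × Int)
    (c : Int × Int) : List (List Bool) × Int :=
  if 1 ≤ pvVal m c.1 c.2 ∧ pvVisAt st.1 c.1 c.2 = false then
    (pvBfs m rows cols (rows.toNat * cols.toNat + 1) [(c.1, c.2)] (pvMark st.1 c.1 c.2), st.2 + 1)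
  else st

def pvInit (rows cols : Int) : List (List Bool) :=
  (PySem.List.pyRange 0 rows 1).map (fun _ => List.replicate cols.toNat false)

theorem pvA_eq (m : List (List Int)) :
    is_fully_connected m =
      (((pvAll ((m.length : Int)) ((PySem.List.pyGetD m 0 ([] : List Int)).length : Int)).foldl
          (pvStep m ((m.length : Int)) ((PySem.List.pyGetD m 0 ([] : List Int)).length : Int))
          (pvInit ((m.length : Int)) ((PySem.List.pyGetD m 0 ([] : List Int)).length : Int),
            (0 : Int))).2 == 1) := by
  rw [is_fully_connected, pvAll_flat, List.foldl_flatMap]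
  simp only [List.foldl_map]
  rfl

theorem pvInit_WF (rows cols : Int) (h0 : 0 ≤ rows) : pvWF rows cols (pvInit rows cols) := by
  constructor
  · simp [pvInit, PySem.List.length_pyRange_one]
  · intro r hr
    simp only [pvInit, List.mem_map] at hr
    obtain ⟨-, -, rfl⟩ := hr
    simp

theorem pvInit_VS (rows cols : Int) (p : Int × Int) : ¬ pvVS rows cols (pvInit rows cols) p := by
  rintro ⟨⟨h1, h2, h3, h4⟩, hvis⟩
  rw [pvVisAt_eq _ _ _ h1 h3] at hvis
  simp only [pvInit, List.getElem?_map] at hvis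
  rcases h : (PySem.List.pyRange 0 rows 1)[(p.1).toNat]? with _ | r
  · simp [h] at hvis
  · simp [h, List.getElem?_replicate] at hvis
    split at hvis <;> simp_all

-- the outer-loop invariant: the count is 0 with nothing visited, or 1 with exactly one
-- component visited, or ≥ 2 with two provably disconnected qualifying cells seen
def pvCase (m : List (List Int)) (rows cols : Int) (st : List (List Bool) × Int) : Prop :=
  (st.2 = 0 ∧ ∀ p, ¬ pvVS rows cols st.1 p) ∨
  (st.2 = 1 ∧ ∃ c₀, pvQ m rows cols c₀ ∧
    (∀ p, pvVS rows cols st.1 p ↔ pvComp m rows cols c₀ p)) ∨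
  (2 ≤ st.2 ∧ ∃ c₀ s, pvQ m rows cols c₀ ∧ pvQ m rows cols s ∧ ¬ pvComp m rows cols c₀ s)

theorem pvClosed_congr (m : List (List Int)) (rows cols : Int) (T T' : Int × Int → Prop)
    (h : ∀ p, T p ↔ T' p) (hT : pvClosed m rows cols T) : pvClosed m rows cols T' := by
  intro p q hp hq hadj
  exact (h q).mp (hT p q ((h p).mpr hp) hq hadj)

theorem pvOuter_inv (m : List (List Int)) (rows cols : Int) :
    ∀ (cs : List (Int × Int)) (st : List (List Bool) × Int),
    (∀ c ∈ cs, pvInR rows cols c) →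
    pvWF rows cols st.1 →
    (∀ p, pvVS rows cols st.1 p → pvQ m rows cols p) →
    pvClosed m rows cols (pvVS rows cols st.1) →
    pvCase m rows cols st →
    pvWF rows cols (cs.foldl (pvStep m rows cols) st).1 ∧
    (∀ p, pvVS rows cols st.1 p → pvVS rows cols (cs.foldl (pvStep m rows cols) st).1 p) ∧
    (∀ c ∈ cs, pvQ m rows cols c → pvVS rows cols (cs.foldl (pvStep m rows cols) st).1 c) ∧
    (∀ p, pvVS rows cols (cs.foldl (pvStep m rows cols) st).1 p → pvQ m rows cols p) ∧
    pvClosed m rows cols (pvVS rows cols (cs.foldl (pvStep m rows cols) st).1) ∧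
    pvCase m rows cols (cs.foldl (pvStep m rows cols) st) := by
  intro cs
  induction cs with
  | nil =>
      intro st _ hwf hsub hcl hcase
      exact ⟨hwf, fun p h => h, by simp, hsub, hcl, hcase⟩
  | cons c cs ih =>
      intro st hInR hwf hsub hcl hcase
      have hInRc : pvInR rows cols c := hInR c List.mem_cons_self
      rw [List.foldl_cons]
      by_cases hg : 1 ≤ pvVal m c.1 c.2 ∧ pvVisAt st.1 c.1 c.2 = false
      · have hQc : pvQ m rows cols c := ⟨hInRc, hg.1⟩
        have hns : ¬ pvVS rows cols st.1 c := by
          rintro ⟨-, hvis⟩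
          rw [hg.2] at hvis
          cases hvis
        have hstep : pvStep m rows cols st c =
            (pvBfs m rows cols (rows.toNat * cols.toNat + 1) [(c.1, c.2)] (pvMark st.1 c.1 c.2),
              st.2 + 1) := by
          rw [pvStep, if_pos hg]
        obtain ⟨hwf', hiff⟩ := pvBfs_start m rows cols st.1 c hwf hsub hcl hQc hns
        have hsub' : ∀ p, pvVS rows cols (pvStep m rows cols st c).1 p → pvQ m rows cols p := by
          intro p hp
          rw [hstep] at hp
          rcases (hiff p).mp hp with h | h
          · exact hsub p h
          · exact pvComp_sub_Q m rows cols c p hQc h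
        have hcl' : pvClosed m rows cols (pvVS rows cols (pvStep m rows cols st c).1) := by
          refine pvClosed_congr m rows cols _ _ (fun p => ?_)
            (pvClosed_union m rows cols _ _ hcl (pvComp_closed m rows cols c))
          rw [hstep]
          exact (hiff p).symm
        have hwf2 : pvWF rows cols (pvStep m rows cols st c).1 := by rw [hstep]; exact hwf'
        have hcase' : pvCase m rows cols (pvStep m rows cols st c) := by
          rcases hcase with ⟨h0, hemp⟩ | ⟨h1, c₀, hc₀, hvs⟩ | ⟨h2, c₀, t, hc₀, ht, hnc⟩
          · refine Or.inr (Or.inl ⟨by rw [hstep]; simp [h0], c, hQc, ?_⟩)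
            intro p
            rw [hstep]
            rw [hiff p]
            constructor
            · rintro (h | h)
              · exact absurd h (hemp p)
              · exact h
            · exact Or.inr
          · refine Or.inr (Or.inr ⟨by rw [hstep]; simp; omega, c₀, c, hc₀, hQc, ?_⟩)
            intro hcomp
            exact hns ((hvs c).mpr hcomp)
          · exact Or.inr (Or.inr ⟨by rw [hstep]; simp; omega, c₀, t, hc₀, ht, hnc⟩)
        have hmono : ∀ p, pvVS rows cols st.1 p → pvVS rows cols (pvStep m rows cols st c).1 p := by
          intro p hp
          rw [hstep]
          exact (hiff p).mpr (Or.inl hp)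
        obtain ⟨k1, k2, k3, k4, k5, k6⟩ :=
          ih (pvStep m rows cols st c) (fun a ha => hInR a (List.mem_cons_of_mem c ha))
            hwf2 hsub' hcl' hcase'
        refine ⟨k1, fun p hp => k2 p (hmono p hp), ?_, k4, k5, k6⟩
        intro a ha hQa
        rcases List.mem_cons.mp ha with rfl | ha
        · refine k2 a ?_
          rw [hstep]
          exact (hiff a).mpr (Or.inr (pvComp_self m rows cols a))
        · exact k3 a ha hQa
      · have hstep : pvStep m rows cols st c = st := by rw [pvStep, if_neg hg]
        rw [hstep]
        obtain ⟨k1, k2, k3, k4, k5, k6⟩ :=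
          ih st (fun a ha => hInR a (List.mem_cons_of_mem c ha)) hwf hsub hcl hcase
        refine ⟨k1, k2, ?_, k4, k5, k6⟩
        intro a ha hQa
        rcases List.mem_cons.mp ha with rfl | ha
        · refine k2 a ⟨hQa.1, ?_⟩
          by_cases hv : pvVisAt st.1 a.1 a.2 = false
          · exact absurd ⟨hQa.2, hv⟩ hg
          · simpa using hv
        · exact k3 a ha hQa

-- B's cell list is the filtered row-major cell list
theorem pvCells_inner (m : List (List Int)) (i : Int) :
    ∀ (l : List Int) (acc : List (Int × Int)),
    l.foldl (fun acc j => if 1 ≤ pvVal m i j then acc ++ [(i, j)] else acc) acc =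
      acc ++ (l.filter (fun j => decide (1 ≤ pvVal m i j))).map (fun j => (i, j)) := by
  intro l
  induction l with
  | nil => intro acc; simp
  | cons a l ih =>
      intro acc
      rw [List.foldl_cons, List.filter_cons]
      by_cases h : 1 ≤ pvVal m i a
      · simp [h, ih]
      · simp [h, ih]

theorem pvCells_outer (m : List (List Int)) (rows cols : Int) :
    ∀ (l : List Int) (acc : List (Int × Int)),
    l.foldl (fun acc i =>
      (PySem.List.pyRange 0 cols 1).foldl
        (fun acc j => if 1 ≤ pvVal m i j then acc ++ [(i, j)] else acc) acc) acc =
      acc ++ l.flatMap (fun i =>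
        ((PySem.List.pyRange 0 cols 1).filter (fun j => decide (1 ≤ pvVal m i j))).map
          (fun j => (i, j))) := by
  intro l
  induction l with
  | nil => intro acc; simp
  | cons a l ih =>
      intro acc
      rw [List.foldl_cons, pvCells_inner m a, ih, List.flatMap_cons, List.append_assoc]

theorem pvCells_eq (m : List (List Int)) (rows cols : Int) :
    pvCells m rows cols = (pvAll rows cols).filter (fun c => decide (1 ≤ pvVal m c.1 c.2)) := by
  rw [pvCells, pvCells_outer m rows cols, pvAll_flat, List.filter_flatMap]
  simp only [List.filter_map, List.nil_append]
  rfl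

theorem pvCells_mem (m : List (List Int)) (rows cols : Int) (c : Int × Int) :
    c ∈ pvCells m rows cols ↔ pvQ m rows cols c := by
  rw [pvCells_eq, List.mem_filter]
  simp [pvAll_mem, pvQ]

theorem pvCells_nodup (m : List (List Int)) (rows cols : Int) : (pvCells m rows cols).Nodup := by
  rw [pvCells_eq]
  exact List.Nodup.filter _ (pvAll_nodup rows cols)

-- Python sets over nodup lists
theorem pvFoldl_add_eq (l : List (Int × Int)) :
    ∀ (s : List (Int × Int)), (s ++ l).Nodup → l.foldl PySem.Set.add s = s ++ l := by
  induction l with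
  | nil => intro s _; simp
  | cons a l ih =>
      intro s hnd
      have hmem : a ∉ s := by
        rw [List.nodup_append] at hnd
        intro hs
        exact hnd.2.2 a hs a List.mem_cons_self rfl
      have hadd : PySem.Set.add s a = s ++ [a] := by
        simp only [PySem.Set.add, PySem.Set.contains]
        rw [if_neg (by simpa [List.contains_iff_mem] using hmem)]
      rw [List.foldl_cons, hadd, ih (s ++ [a]) (by simpa using hnd)]
      simp

theorem pvOfList_eq (l : List (Int × Int)) (h : l.Nodup) : PySem.Set.ofList l = l := by
  have := pvFoldl_add_eq l [] (by simpa using h)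
  simpa [PySem.Set.ofList, PySem.Set.empty] using this

-- the neighbour test of B is adjacency to the reached set
theorem pvNbr_iff (reached : List (Int × Int)) (c : Int × Int) :
    ((PySem.Set.contains reached (c.1 + 1, c.2) || PySem.Set.contains reached (c.1 - 1, c.2)
      || PySem.Set.contains reached (c.1, c.2 + 1) || PySem.Set.contains reached (c.1, c.2 - 1))
      = true) ↔ ∃ p ∈ reached, pvAdj p c := by
  obtain ⟨cx, cy⟩ := c
  simp only [PySem.Set.contains, Bool.or_eq_true, List.contains_iff_mem]
  constructor
  · rintro (((h | h) | h) | h)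
    · exact ⟨_, h, ⟨(-1, 0), by simp [pvDirs], by simp⟩⟩
    · exact ⟨_, h, ⟨(1, 0), by simp [pvDirs], by simp⟩⟩
    · exact ⟨_, h, ⟨(0, -1), by simp [pvDirs], by simp⟩⟩
    · exact ⟨_, h, ⟨(0, 1), by simp [pvDirs], by simp⟩⟩
  · rintro ⟨p, hp, d, hd, he⟩
    obtain ⟨px, py⟩ := p
    simp only [pvDirs, List.mem_cons, List.not_mem_nil, or_false] at hd
    simp only [Prod.mk.injEq] at he
    rcases hd with rfl | rfl | rfl | rfl
    · simp only at he
      exact Or.inr (by rw [show ((cx, cy - 1) : Int × Int) = (px, py) by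
        simp only [Prod.mk.injEq]; omega]; exact hp)
    · simp only at he
      exact Or.inl (Or.inr (by rw [show ((cx, cy + 1) : Int × Int) = (px, py) by
        simp only [Prod.mk.injEq]; omega]; exact hp))
    · simp only at he
      exact Or.inl (Or.inl (Or.inr (by rw [show ((cx - 1, cy) : Int × Int) = (px, py) by
        simp only [Prod.mk.injEq]; omega]; exact hp)))
    · simp only at he
      exact Or.inl (Or.inl (Or.inl (by rw [show ((cx + 1, cy) : Int × Int) = (px, py) by
        simp only [Prod.mk.injEq]; omega]; exact hp)))

theorem pvGrow_aux (reached : List (Int × Int)) :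
    ∀ (cl : List (Int × Int)) (g : List (Int × Int)), g.Nodup →
    ∃ new,
      cl.foldl (fun grown c =>
        if PySem.Set.contains grown c then grown
        else if PySem.Set.contains reached (c.1 + 1, c.2) || PySem.Set.contains reached (c.1 - 1, c.2)
            || PySem.Set.contains reached (c.1, c.2 + 1) || PySem.Set.contains reached (c.1, c.2 - 1)
        then PySem.Set.add grown c
        else grown) g = g ++ new ∧
      (g ++ new).Nodup ∧
      (∀ c ∈ new, c ∈ cl ∧ c ∉ g ∧ ∃ p ∈ reached, pvAdj p c) ∧
      (∀ c ∈ cl, (∃ p ∈ reached, pvAdj p c) → c ∈ g ++ new) := by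
  intro cl
  induction cl with
  | nil =>
      intro g hnd
      exact ⟨[], by simp, by simpa using hnd, by simp, by simp⟩
  | cons c cl ih =>
      intro g hnd
      rw [List.foldl_cons]
      by_cases hc : PySem.Set.contains g c = true
      · rw [if_pos hc]
        have hcg : c ∈ g := by simpa [PySem.Set.contains, List.contains_iff_mem] using hc
        obtain ⟨new, he, h1, h2, h3⟩ := ih g hnd
        refine ⟨new, he, h1, ?_, ?_⟩
        · intro a ha
          obtain ⟨x1, x2, x3⟩ := h2 a ha
          exact ⟨List.mem_cons_of_mem c x1, x2, x3⟩
        · intro a ha hnbr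
          rcases List.mem_cons.mp ha with rfl | ha
          · exact List.mem_append.mpr (Or.inl hcg)
          · exact h3 a ha hnbr
      · rw [if_neg hc]
        have hcg : c ∉ g := by simpa [PySem.Set.contains, List.contains_iff_mem] using hc
        by_cases hnb : (PySem.Set.contains reached (c.1 + 1, c.2) || PySem.Set.contains reached (c.1 - 1, c.2)
            || PySem.Set.contains reached (c.1, c.2 + 1) || PySem.Set.contains reached (c.1, c.2 - 1)) = true
        · rw [if_pos hnb]
          have hadd : PySem.Set.add g c = g ++ [c] := by
            simp only [PySem.Set.add, PySem.Set.contains]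
            rw [if_neg (by simpa [List.contains_iff_mem] using hcg)]
          rw [hadd]
          have hnd1 : (g ++ [c]).Nodup := by
            rw [List.nodup_append]
            refine ⟨hnd, List.nodup_singleton c, ?_⟩
            intro a ha b hb
            simp only [List.mem_cons, List.not_mem_nil, or_false] at hb
            subst hb
            exact fun h => hcg (h ▸ ha)
          obtain ⟨new, he, h1, h2, h3⟩ := ih (g ++ [c]) hnd1
          refine ⟨c :: new, by rw [he]; simp, by simpa using h1, ?_, ?_⟩
          · intro a ha
            rcases List.mem_cons.mp ha with rfl | ha
            · exact ⟨List.mem_cons_self, hcg, (pvNbr_iff reached a).mp hnb⟩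
            · obtain ⟨x1, x2, x3⟩ := h2 a ha
              refine ⟨List.mem_cons_of_mem c x1, fun hga => x2 ?_, x3⟩
              exact List.mem_append.mpr (Or.inl hga)
          · intro a ha hnbr
            rcases List.mem_cons.mp ha with rfl | ha
            · simp
            · have := h3 a ha hnbr
              simpa using this
        · rw [if_neg hnb]
          obtain ⟨new, he, h1, h2, h3⟩ := ih g hnd
          refine ⟨new, he, h1, ?_, ?_⟩
          · intro a ha
            obtain ⟨x1, x2, x3⟩ := h2 a ha
            exact ⟨List.mem_cons_of_mem c x1, x2, x3⟩
          · intro a ha hnbr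
            rcases List.mem_cons.mp ha with rfl | ha
            · exact absurd ((pvNbr_iff reached a).mpr hnbr) hnb
            · exact h3 a ha hnbr

theorem pvGrow_spec (cellsL reached : List (Int × Int)) (hnd : reached.Nodup) :
    ∃ new, pvGrow cellsL reached = reached ++ new ∧ (reached ++ new).Nodup ∧
      (∀ c ∈ new, c ∈ cellsL ∧ c ∉ reached ∧ ∃ p ∈ reached, pvAdj p c) ∧
      (∀ c ∈ cellsL, (∃ p ∈ reached, pvAdj p c) → c ∈ reached ++ new) := by
  have h := pvGrow_aux reached cellsL reached hnd
  rw [pvGrow, pvOfList_eq reached hnd]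
  exact h

theorem pvNodup_length_le (l1 l2 : List (Int × Int)) (hnd : l1.Nodup)
    (hsub : ∀ c ∈ l1, c ∈ l2) : l1.length ≤ l2.length := by
  have h1 : l1.toFinset.card = l1.length := List.toFinset_card_of_nodup hnd
  have h2 : l1.toFinset ⊆ l2.toFinset := by
    intro x hx
    rw [List.mem_toFinset] at hx ⊢
    exact hsub x hx
  have h3 := Finset.card_le_card h2
  have h4 := List.toFinset_card_le l2
  omega

theorem pvExpand_spec (m : List (List Int)) (rows cols : Int) (cellsL : List (Int × Int))
    (c₀ : Int × Int) (hmem : ∀ c, c ∈ cellsL ↔ pvQ m rows cols c) (hndC : cellsL.Nodup) :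
    ∀ (fuel : Nat) (reached : List (Int × Int)), reached.Nodup →
    (∀ c ∈ reached, c ∈ cellsL) → c₀ ∈ reached →
    (∀ c ∈ reached, pvComp m rows cols c₀ c) →
    cellsL.length + 1 ≤ fuel + reached.length →
    (pvExpand cellsL fuel reached).Nodup ∧
    (∀ c, c ∈ pvExpand cellsL fuel reached ↔ pvComp m rows cols c₀ c) := by
  intro fuel
  induction fuel with
  | zero =>
      intro reached hnd hsub _ _ hfuel
      have := pvNodup_length_le reached cellsL hnd hsub
      omega
  | succ fuel ih =>
      intro reached hnd hsub hc₀ hcomp hfuel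
      obtain ⟨new, he, hnd', hnew, hfix⟩ := pvGrow_spec cellsL reached hnd
      by_cases hlen : PySem.Set.len (pvGrow cellsL reached) == PySem.Set.len reached
      · have hstep : pvExpand cellsL (fuel + 1) reached = reached := by
          rw [pvExpand, if_pos hlen]
        have hnewnil : new = [] := by
          have : (pvGrow cellsL reached).length = reached.length := by
            have := (beq_iff_eq).mp hlen
            simpa [PySem.Set.len] using this
          rw [he, List.length_append] at this
          simpa using this
        subst hnewnil
        rw [hstep]
        refine ⟨hnd, fun c => ⟨fun hc => hcomp c hc, fun hc => ?_⟩⟩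
        have hclosed : pvClosed m rows cols (fun p => p ∈ reached) := by
          intro p q hp hq hadj
          have hq' : q ∈ cellsL := (hmem q).mpr hq
          have := hfix q hq' ⟨p, hp, hadj⟩
          simpa using this
        exact hc _ hclosed hc₀
      · have hstep : pvExpand cellsL (fuel + 1) reached =
            pvExpand cellsL fuel (pvGrow cellsL reached) := by
          rw [pvExpand, if_neg (by simpa using hlen)]
        rw [hstep, he]
        have hnewne : new ≠ [] := by
          rintro rfl
          simp at he
          rw [he] at hlen
          simp at hlen
        refine ih (reached ++ new) hnd' ?_ (List.mem_append.mpr (Or.inl hc₀)) ?_ ?_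
        · intro c hc
          rcases List.mem_append.mp hc with hc | hc
          · exact hsub c hc
          · exact (hnew c hc).1
        · intro c hc
          rcases List.mem_append.mp hc with hc | hc
          · exact hcomp c hc
          · obtain ⟨h1, -, p, hp, hadj⟩ := hnew c hc
            exact pvComp_closed m rows cols c₀ p c (hcomp p hp) ((hmem c).mp h1) hadj
        · have : 1 ≤ new.length := by
            cases new
            · exact absurd rfl hnewne
            · simp
          simp only [List.length_append]
          omega

-- the two ports agree on every input (with or without the precondition)
theorem pvMain (m : List (List Int)) : is_fully_connected m = is_fully_connected_alt m := by
  have hrows0 : (0 : Int) ≤ (m.length : Int) := Int.natCast_nonneg _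
  have hBeq : is_fully_connected_alt m =
      (if (pvCells m ((m.length : Int)) ((PySem.List.pyGetD m 0 ([] : List Int)).length : Int)).isEmpty = true
       then false
       else (PySem.Set.len
          (pvExpand (pvCells m ((m.length : Int)) ((PySem.List.pyGetD m 0 ([] : List Int)).length : Int))
            ((pvCells m ((m.length : Int)) ((PySem.List.pyGetD m 0 ([] : List Int)).length : Int)).length + 1)
            (PySem.Set.add PySem.Set.empty
              (PySem.List.pyGetD
                (pvCells m ((m.length : Int)) ((PySem.List.pyGetD m 0 ([] : List Int)).length : Int))
                0 ((0 : Int), (0 : Int))))) ==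
          ((pvCells m ((m.length : Int)) ((PySem.List.pyGetD m 0 ([] : List Int)).length : Int)).length : Int))) :=
    rfl
  obtain ⟨k1, k2, k3, k4, k5, k6⟩ :=
    pvOuter_inv m ((m.length : Int)) ((PySem.List.pyGetD m 0 ([] : List Int)).length : Int)
      (pvAll ((m.length : Int)) ((PySem.List.pyGetD m 0 ([] : List Int)).length : Int))
      (pvInit ((m.length : Int)) ((PySem.List.pyGetD m 0 ([] : List Int)).length : Int), (0 : Int))
      (fun c hc => (pvAll_mem _ _ c).mp hc)
      (pvInit_WF _ _ hrows0)
      (fun p hp => absurd hp (pvInit_VS _ _ p))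
      (fun p q hp _ _ => absurd hp (pvInit_VS _ _ p))
      (Or.inl ⟨rfl, pvInit_VS _ _⟩)
  have hcover : ∀ c, pvQ m ((m.length : Int)) ((PySem.List.pyGetD m 0 ([] : List Int)).length : Int) c →
      pvVS ((m.length : Int)) ((PySem.List.pyGetD m 0 ([] : List Int)).length : Int) ((pvAll ((m.length : Int)) ((PySem.List.pyGetD m 0 ([] : List Int)).length : Int)).foldl
        (pvStep m ((m.length : Int)) ((PySem.List.pyGetD m 0 ([] : List Int)).length : Int)) (pvInit ((m.length : Int)) ((PySem.List.pyGetD m 0 ([] : List Int)).length : Int), (0 : Int))).1 c :=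
    fun c hc => k3 c ((pvAll_mem _ _ c).mpr hc.1) hc
  have hcellsmem := pvCells_mem m ((m.length : Int)) ((PySem.List.pyGetD m 0 ([] : List Int)).length : Int)
  have hcellsnd := pvCells_nodup m ((m.length : Int)) ((PySem.List.pyGetD m 0 ([] : List Int)).length : Int)
  rw [pvA_eq m, hBeq]
  rcases k6 with ⟨h0, hemp⟩ | ⟨h1, c₀, hc₀Q, hvs⟩ | ⟨h2, c₀, t, hc₀Q, htQ, hnc⟩
  · -- no qualifying cell: count 0 vs empty cell list
    have hcellsnil : pvCells m ((m.length : Int)) ((PySem.List.pyGetD m 0 ([] : List Int)).length : Int) = [] :=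
      List.eq_nil_iff_forall_not_mem.mpr
        (fun a ha => hemp a (hcover a ((hcellsmem a).mp ha)))
    rw [hcellsnil, h0]
    simp
  · -- one component: count 1 vs full coverage by the fixpoint set
    rcases hc : pvCells m ((m.length : Int)) ((PySem.List.pyGetD m 0 ([] : List Int)).length : Int) with
      _ | ⟨chd, ctl⟩
    · exact absurd ((hcellsmem c₀).mpr hc₀Q) (by rw [hc]; simp)
    · have hchdQ : pvQ m ((m.length : Int)) ((PySem.List.pyGetD m 0 ([] : List Int)).length : Int) chd := (hcellsmem chd).mp (by rw [hc]; exact List.mem_cons_self)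
      have hQcomp : ∀ q, pvQ m ((m.length : Int)) ((PySem.List.pyGetD m 0 ([] : List Int)).length : Int) q → pvComp m ((m.length : Int)) ((PySem.List.pyGetD m 0 ([] : List Int)).length : Int) chd q := by
        intro q hq
        have h1q := (hvs q).mp (hcover q hq)
        have h1chd := (hvs chd).mp (hcover chd hchdQ)
        exact pvComp_trans _ _ _ _ _ _ (pvComp_symm _ _ _ _ _ hc₀Q h1chd) h1q
      have hmem' : ∀ c, c ∈ (chd :: ctl) ↔ pvQ m ((m.length : Int)) ((PySem.List.pyGetD m 0 ([] : List Int)).length : Int) c := by rw [← hc]; exact hcellsmem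
      have hnd' : (chd :: ctl).Nodup := by rw [← hc]; exact hcellsnd
      obtain ⟨hrnd, hrmem⟩ := pvExpand_spec m ((m.length : Int)) ((PySem.List.pyGetD m 0 ([] : List Int)).length : Int) (chd :: ctl) chd hmem' hnd'
        ((chd :: ctl).length + 1) [chd] (List.nodup_singleton chd)
        (by intro c hcm; simp only [List.mem_cons, List.not_mem_nil, or_false] at hcm; subst hcm
            exact List.mem_cons_self)
        List.mem_cons_self
        (by intro c hcm; simp only [List.mem_cons, List.not_mem_nil, or_false] at hcm; subst hcm
            exact pvComp_self m ((m.length : Int)) ((PySem.List.pyGetD m 0 ([] : List Int)).length : Int) c)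
        (by omega)
      have hreq : ∀ c, c ∈ pvExpand (chd :: ctl) ((chd :: ctl).length + 1) [chd] ↔
          c ∈ (chd :: ctl) := by
        intro c
        rw [hrmem c, hmem' c]
        exact ⟨pvComp_sub_Q m ((m.length : Int)) ((PySem.List.pyGetD m 0 ([] : List Int)).length : Int) chd c hchdQ, hQcomp c⟩
      have hfin : (pvExpand (chd :: ctl) ((chd :: ctl).length + 1) [chd]).toFinset =
          (chd :: ctl).toFinset := by
        ext x
        rw [List.mem_toFinset, List.mem_toFinset, hreq]
      have hlen : (pvExpand (chd :: ctl) ((chd :: ctl).length + 1) [chd]).length =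
          (chd :: ctl).length := by
        have e1 := List.toFinset_card_of_nodup hrnd
        have e2 := List.toFinset_card_of_nodup hnd'
        rw [hfin] at e1
        omega
      rw [h1]
      have hadd : PySem.Set.add PySem.Set.empty (PySem.List.pyGetD (chd :: ctl) 0 ((0 : Int), (0 : Int))) =
          [chd] := by
        rw [PySem.List.pyGetD_zero_cons]
        rfl
      rw [hadd]
      simp only [PySem.Set.len]
      rw [hlen]
      simp
  · -- two or more components: count ≠ 1 and the fixpoint set misses a qualifying cell
    have hc₀mem : c₀ ∈ pvCells m ((m.length : Int)) ((PySem.List.pyGetD m 0 ([] : List Int)).length : Int) := (hcellsmem c₀).mpr hc₀Q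
    rcases hc : pvCells m ((m.length : Int)) ((PySem.List.pyGetD m 0 ([] : List Int)).length : Int) with
      _ | ⟨chd, ctl⟩
    · exact absurd hc₀mem (by rw [hc]; simp)
    · have hchdQ : pvQ m ((m.length : Int)) ((PySem.List.pyGetD m 0 ([] : List Int)).length : Int) chd := (hcellsmem chd).mp (by rw [hc]; exact List.mem_cons_self)
      have hmem' : ∀ c, c ∈ (chd :: ctl) ↔ pvQ m ((m.length : Int)) ((PySem.List.pyGetD m 0 ([] : List Int)).length : Int) c := by rw [← hc]; exact hcellsmem
      have hnd' : (chd :: ctl).Nodup := by rw [← hc]; exact hcellsnd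
      obtain ⟨hrnd, hrmem⟩ := pvExpand_spec m ((m.length : Int)) ((PySem.List.pyGetD m 0 ([] : List Int)).length : Int) (chd :: ctl) chd hmem' hnd'
        ((chd :: ctl).length + 1) [chd] (List.nodup_singleton chd)
        (by intro c hcm; simp only [List.mem_cons, List.not_mem_nil, or_false] at hcm; subst hcm
            exact List.mem_cons_self)
        List.mem_cons_self
        (by intro c hcm; simp only [List.mem_cons, List.not_mem_nil, or_false] at hcm; subst hcm
            exact pvComp_self m ((m.length : Int)) ((PySem.List.pyGetD m 0 ([] : List Int)).length : Int) c)
        (by omega)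
      have hA : (((pvAll ((m.length : Int)) ((PySem.List.pyGetD m 0 ([] : List Int)).length : Int)).foldl
          (pvStep m ((m.length : Int)) ((PySem.List.pyGetD m 0 ([] : List Int)).length : Int)) (pvInit ((m.length : Int)) ((PySem.List.pyGetD m 0 ([] : List Int)).length : Int), (0 : Int))).2 == 1) = false :=
        beq_eq_false_iff_ne.mpr (by omega)
      rw [hA]
      have hadd : PySem.Set.add PySem.Set.empty (PySem.List.pyGetD (chd :: ctl) 0 ((0 : Int), (0 : Int))) =
          [chd] := by
        rw [PySem.List.pyGetD_zero_cons]
        rfl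
      rw [hadd]
      have hne : (PySem.Set.len (pvExpand (chd :: ctl) ((chd :: ctl).length + 1) [chd]) ==
          ((chd :: ctl).length : Int)) = false := by
        rw [beq_eq_false_iff_ne]
        intro heq
        have hlen : (pvExpand (chd :: ctl) ((chd :: ctl).length + 1) [chd]).length =
            (chd :: ctl).length := by
          simp only [PySem.Set.len] at heq
          exact_mod_cast heq
        have hsubF : (pvExpand (chd :: ctl) ((chd :: ctl).length + 1) [chd]).toFinset ⊆
            (chd :: ctl).toFinset := by
          intro x hx
          rw [List.mem_toFinset] at hx ⊢
          exact (hmem' x).mpr (pvComp_sub_Q m ((m.length : Int)) ((PySem.List.pyGetD m 0 ([] : List Int)).length : Int) chd x hchdQ ((hrmem x).mp hx))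
        have e1 := List.toFinset_card_of_nodup hrnd
        have e2 := List.toFinset_card_of_nodup hnd'
        have hfin := Finset.eq_of_subset_of_card_le hsubF (by omega)
        have hall : ∀ x, x ∈ (chd :: ctl) → pvComp m ((m.length : Int)) ((PySem.List.pyGetD m 0 ([] : List Int)).length : Int) chd x := by
          intro x hx
          have : x ∈ (pvExpand (chd :: ctl) ((chd :: ctl).length + 1) [chd]).toFinset := by
            rw [hfin, List.mem_toFinset]
            exact hx
          rw [List.mem_toFinset] at this
          exact (hrmem x).mp this
        have hcompt : pvComp m ((m.length : Int)) ((PySem.List.pyGetD m 0 ([] : List Int)).length : Int) chd t := hall t ((hmem' t).mpr htQ)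
        have hcompc₀ : pvComp m ((m.length : Int)) ((PySem.List.pyGetD m 0 ([] : List Int)).length : Int) chd c₀ := hall c₀ (by rw [hc] at hc₀mem; exact hc₀mem)
        exact hnc (pvComp_trans _ _ _ _ _ _ (pvComp_symm _ _ _ _ _ hchdQ hcompc₀) hcompt)
      rw [hne]
      simp

-- ===== VERDICT (by name: the statement is the Claim_ definition above) =====
theorem is_fully_connected_spec : Claim_equal_is_fully_connected := by
  intro matrix _ _
  unfold Spec_is_fully_connected
  exact pvMain matrix
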